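-- pv_equiv track=rewrite | github.com/g0tmk/internet_connection_monitor | summary.py | remove_duplicate_data_points
-- ===== SOURCE A (Python) =====
-- def remove_duplicate_data_points(date_value_tuple):
--     results = []
--     for idx in range(len(date_value_tuple)):
--         if idx == 0:
--             results.append(date_value_tuple[idx])
--             continue
--
--         try:
--             if (date_value_tuple[idx - 1][1]
--                     == date_value_tuple[idx][1]
--                     == date_value_tuple[idx + 1][1]):
--                 continue
--             else:
--                 results.append(date_value_tuple[idx])
--         except IndexError:
--             # if there is an error in lookup (probably at the beginning or end
--             # of the list) then just include the value
--             results.append(date_value_tuple[idx])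
--     return results
-- ===== SOURCE B (Python) =====
-- def remove_duplicate_data_points(date_value_tuple):
--     # Keep only the first and last point of every maximal run of equal
--     # consecutive values (single scan over runs instead of per-index
--     # neighbour checks).
--     out = []
--     i, n = 0, len(date_value_tuple)
--     while i < n:
--         v = date_value_tuple[i][1]
--         j = i + 1
--         while j < n and date_value_tuple[j][1] == v:
--             j += 1
--         out.append(date_value_tuple[i])
--         if j - i >= 2:
--             out.append(date_value_tuple[j - 1])
--         i = j
--     return out
-- ===== Notes on version B (the rewrite author's own statement) =====
-- stated objective: alternative
-- what changed: B scans the list run by run (an inner while advances past each maximal run of equal values) and emits only each run's first and last point, instead of A's per-index loop that re-reads both neighbours of every index and relies on catching IndexError at the end of the list.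
import Mathlib
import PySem

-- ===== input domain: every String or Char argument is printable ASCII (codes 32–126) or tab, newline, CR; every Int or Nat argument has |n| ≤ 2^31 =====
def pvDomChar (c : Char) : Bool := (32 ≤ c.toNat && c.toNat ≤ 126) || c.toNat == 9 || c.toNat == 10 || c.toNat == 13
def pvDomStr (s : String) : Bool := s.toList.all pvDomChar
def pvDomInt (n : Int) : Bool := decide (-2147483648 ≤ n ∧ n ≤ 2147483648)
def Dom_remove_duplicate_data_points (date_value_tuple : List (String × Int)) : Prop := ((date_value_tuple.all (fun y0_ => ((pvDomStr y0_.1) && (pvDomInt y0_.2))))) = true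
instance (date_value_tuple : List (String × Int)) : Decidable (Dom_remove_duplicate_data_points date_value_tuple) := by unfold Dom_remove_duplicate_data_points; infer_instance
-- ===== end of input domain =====

-- B replaces A's per-index loop (neighbour lookups plus an IndexError catch) by a single
-- run-by-run scan keeping each maximal run's first and last point (objective: alternative
-- decomposition, same cost).

-- ===== PORT A =====
-- Literal port of A: for idx in range(len(l)); idx == 0 always appends; otherwise the
-- chained comparison l[idx-1][1] == l[idx][1] == l[idx+1][1] evaluates left to right and
-- an IndexError (pyGet? = none) appends the element. The `none => results` arms for
-- l[idx] and l[idx-1] are unreachable (idx ranges over 0..len-1).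
def remove_duplicate_data_points (date_value_tuple : List (String × Int)) : List (String × Int) :=
  (PySem.List.pyRange 0 date_value_tuple.length 1).foldl (fun results idx =>
    match PySem.List.pyGet? date_value_tuple idx with
    | none => results
    | some cur =>
      if idx = 0 then results ++ [cur]
      else
        match PySem.List.pyGet? date_value_tuple (idx - 1) with
        | none => results ++ [cur]
        | some prev =>
          if prev.2 = cur.2 then
            match PySem.List.pyGet? date_value_tuple (idx + 1) with
            | none => results ++ [cur]  -- IndexError on l[idx+1]: include the value
            | some next => if cur.2 = next.2 then results else results ++ [cur]
          else results ++ [cur]) []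

-- ===== PORT B =====
-- Outer while-loop of Source B = this recursion; the inner while that advances j past the
-- run is takeWhile/dropWhile; `j - i >= 2` is "the run has a second element".
def pvAltGo : List (String × Int) → List (String × Int)
  | [] => []
  | x :: t =>
    let run := t.takeWhile (fun y => y.2 == x.2)
    (x :: (match run.getLast? with | some z => [z] | none => []))
      ++ pvAltGo (t.dropWhile (fun y => y.2 == x.2))
termination_by l => l.length
decreasing_by simp; exact List.length_dropWhile_le _ _

def remove_duplicate_data_points_alt (date_value_tuple : List (String × Int)) : List (String × Int) :=
  pvAltGo date_value_tuple

-- ===== PRECONDITION & SPEC =====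
def Spec_remove_duplicate_data_points (date_value_tuple : List (String × Int)) (out : List (String × Int)) : Prop := out = remove_duplicate_data_points_alt date_value_tuple
instance (date_value_tuple : List (String × Int)) (out : List (String × Int)) : Decidable (Spec_remove_duplicate_data_points date_value_tuple out) := by unfold Spec_remove_duplicate_data_points; infer_instance

-- ===== CLAIM (what is proved, stated in full; the proofs are below) =====
def Claim_equal_remove_duplicate_data_points : Prop := ∀ (date_value_tuple : List (String × Int)), Dom_remove_duplicate_data_points date_value_tuple → Spec_remove_duplicate_data_points date_value_tuple (remove_duplicate_data_points date_value_tuple)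

-- ===== LEMMAS AND PROOFS =====

-- Common characterisation of both programs: drop x exactly when its value equals both the
-- previous value (`prev`, none before the first element) and the next value.
def pvCore (prev : Option Int) : List (String × Int) → List (String × Int)
  | [] => []
  | x :: t =>
    if prev = some x.2 ∧ (t[0]?).map (·.2) = some x.2 then pvCore (some x.2) t
    else x :: pvCore (some x.2) t

-- What A's loop body contributes at index idx (A's branches, value only).
def pvKA (l : List (String × Int)) (idx : Int) : List (String × Int) :=
  match PySem.List.pyGet? l idx with
  | none => []
  | some cur =>
    if idx = 0 then [cur]
    else
      match PySem.List.pyGet? l (idx - 1) with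
      | none => [cur]
      | some prev =>
        if prev.2 = cur.2 then
          match PySem.List.pyGet? l (idx + 1) with
          | none => [cur]
          | some next => if cur.2 = next.2 then [] else [cur]
        else [cur]

-- Nat-indexed, prev-generalised version of pvKA.
def pvKG (prev : Option Int) (l : List (String × Int)) (k : Nat) : List (String × Int) :=
  match l[k]? with
  | none => []
  | some cur =>
    let p : Option Int := match k with | 0 => prev | j+1 => (l[j]?).map (·.2)
    if p = some cur.2 ∧ (l[k+1]?).map (·.2) = some cur.2 then [] else [cur]

theorem pvKA_eq_pvKG (l : List (String × Int)) (k : Nat) (hk : k < l.length) :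
    pvKA l (k : Int) = pvKG none l k := by
  rcases hcur : l[k]? with _ | cur
  · simp at hcur; omega
  cases k with
  | zero =>
    simp [pvKA, pvKG, PySem.List.pyGet?_zero, hcur]
  | succ j =>
    rcases hprev : l[j]? with _ | prevE
    · simp at hprev; omega
    have h1 : PySem.List.pyGet? l ((j + 1 : Nat) : Int) = some cur := by
      rw [PySem.List.pyGet?_natCast, hcur]
    have h2 : PySem.List.pyGet? l (((j + 1 : Nat) : Int) - 1) = some prevE := by
      have : ((j + 1 : Nat) : Int) - 1 = ((j : Nat) : Int) := by push_cast; ring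
      rw [this, PySem.List.pyGet?_natCast, hprev]
    have h3 : PySem.List.pyGet? l (((j + 1 : Nat) : Int) + 1) = l[j + 1 + 1]? := by
      have : ((j + 1 : Nat) : Int) + 1 = ((j + 2 : Nat) : Int) := by push_cast; ring
      rw [this, PySem.List.pyGet?_natCast]
    have hne : ((j + 1 : Nat) : Int) ≠ 0 := by positivity
    rw [pvKA, pvKG]
    rw [h1, hcur]
    simp only [hne, if_false, h2, hprev, Option.map_some]
    by_cases hp : prevE.2 = cur.2
    · rw [if_pos hp]
      rcases hnext : l[j + 1 + 1]? with _ | next <;> rw [h3, hnext]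
      · simp
      · by_cases hn : cur.2 = next.2
        · simp [hn, hp]
        · simp only [Option.map_some]
          rw [if_neg hn, if_neg (by rintro ⟨-, h⟩; simp at h; exact hn h.symm)]
    · rw [if_neg hp, if_neg (by rintro ⟨h, -⟩; simp at h; exact hp h)]

theorem pvKG_shift (prev : Option Int) (x : String × Int) (t : List (String × Int)) (j : Nat) :
    pvKG prev (x :: t) (j + 1) = pvKG (some x.2) t j := by
  cases j with
  | zero =>
    cases h : t[0]? with
    | none => simp [pvKG, h]
    | some cur =>
      simp only [pvKG, h, List.getElem?_cons_succ]
      simp only [List.getElem?_cons_zero, Option.map_some, Nat.zero_add]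
      rfl
  | succ i =>
    cases h : t[i + 1]? with
    | none => simp [pvKG, h]
    | some cur => simp [pvKG, h, show i+1+1 = i+2 from rfl]

theorem flatMap_pvKG (l : List (String × Int)) (prev : Option Int) :
    (List.range l.length).flatMap (pvKG prev l) = pvCore prev l := by
  induction l generalizing prev with
  | nil => simp [pvCore]
  | cons x t ih =>
    rw [List.length_cons, List.range_succ_eq_map, List.flatMap_cons, List.flatMap_map]
    have h2 : List.flatMap (fun a => pvKG prev (x :: t) a.succ) (List.range t.length)
        = List.flatMap (pvKG (some x.2) t) (List.range t.length) := by
      congr 1; funext j; exact pvKG_shift prev x t j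
    rw [h2, ih]
    rw [pvCore]
    by_cases hc : prev = some x.2 ∧ (t[0]?).map (·.2) = some x.2
    · rw [if_pos hc]
      have : pvKG prev (x :: t) 0 = [] := by
        simp only [pvKG, List.getElem?_cons_zero]
        rw [if_pos (by simpa using hc)]
      simp [this]
    · rw [if_neg hc]
      have : pvKG prev (x :: t) 0 = [x] := by
        simp only [pvKG, List.getElem?_cons_zero]
        rw [if_neg (by simpa using hc)]
      simp [this]

theorem A_eq_flatMap (l : List (String × Int)) :
    remove_duplicate_data_points l = (List.range l.length).flatMap (fun k : Nat => pvKA l (k : Int)) := by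
  unfold remove_duplicate_data_points
  have hstep : (fun (results : List (String × Int)) (idx : Int) =>
    match PySem.List.pyGet? l idx with
    | none => results
    | some cur =>
      if idx = 0 then results ++ [cur]
      else
        match PySem.List.pyGet? l (idx - 1) with
        | none => results ++ [cur]
        | some prev =>
          if prev.2 = cur.2 then
            match PySem.List.pyGet? l (idx + 1) with
            | none => results ++ [cur]
            | some next => if cur.2 = next.2 then results else results ++ [cur]
          else results ++ [cur])
      = fun results idx => results ++ pvKA l idx := by
    funext results idx
    rw [pvKA]
    cases hc : PySem.List.pyGet? l idx with
    | none => simp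
    | some cur =>
      simp only []
      split_ifs with h0
      · rfl
      · cases hp : PySem.List.pyGet? l (idx - 1) with
        | none => simp
        | some prev =>
          simp only []
          split_ifs with hpe
          · cases hn : PySem.List.pyGet? l (idx + 1) with
            | none => simp
            | some next => simp only []; split_ifs with hne <;> simp
          · rfl
  rw [hstep, PySem.List.foldl_append_eq_flatMap, PySem.List.pyRange_one]
  simp [List.flatMap_map]

theorem A_eq_core (l : List (String × Int)) :
    remove_duplicate_data_points l = pvCore none l := by
  rw [A_eq_flatMap,
    List.flatMap_congr (fun k hk => pvKA_eq_pvKG l k (List.mem_range.mp hk)),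
    flatMap_pvKG]

theorem core_head_ne (v : Int) (rest : List (String × Int))
    (hrest : (rest[0]?).map (·.2) ≠ some v) :
    pvCore (some v) rest = pvCore none rest := by
  cases rest with
  | nil => rfl
  | cons r rs =>
    have hne : v ≠ r.2 := by
      intro h; exact hrest (by simp [h])
    simp [pvCore, hne]

theorem core_append_run (run : List (String × Int)) (v : Int) (rest : List (String × Int))
    (hrun : ∀ y ∈ run, y.2 = v) (hrest : (rest[0]?).map (·.2) ≠ some v) :
    pvCore (some v) (run ++ rest)
      = (match run.getLast? with | some z => [z] | none => []) ++ pvCore (some v) rest := by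
  induction run with
  | nil => simp
  | cons y run' ih =>
    have hy : y.2 = v := hrun y (by simp)
    cases run' with
    | nil =>
      show pvCore (some v) (y :: rest) = _
      rw [pvCore]
      rw [if_neg (by rintro ⟨-, h2⟩; rw [hy] at h2; exact hrest h2)]
      rw [hy]
      simp
    | cons y' run'' =>
      have hy' : y'.2 = v := hrun y' (by simp)
      have hih := ih (fun z hz => hrun z (by simp [hz]))
      show pvCore (some v) (y :: (y' :: run'') ++ rest) = _
      rw [List.cons_append, pvCore]
      rw [if_pos ⟨by rw [hy], by simp [hy', hy]⟩]
      rw [hy, hih]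
      simp [List.getLast?_cons_cons]

theorem altGo_eq_core (l : List (String × Int)) : pvAltGo l = pvCore none l := by
  induction l using pvAltGo.induct with
  | case1 => simp [pvAltGo, pvCore]
  | case2 x t ih =>
    have hrest : ((t.dropWhile (fun y => y.2 == x.2))[0]?).map (·.2) ≠ some x.2 := by
      cases hd : t.dropWhile (fun y => y.2 == x.2) with
      | nil => simp
      | cons r rs =>
        have := List.head_dropWhile_not (fun y => y.2 == x.2) (l := t) (by simp [hd])
        simp [hd] at this ⊢
        exact this
    have hrun : ∀ y ∈ t.takeWhile (fun y => y.2 == x.2), y.2 = x.2 := by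
      intro y hy
      have := List.mem_takeWhile_imp hy
      simpa using this
    rw [pvAltGo, pvCore]
    rw [if_neg (by simp)]
    conv_rhs => rw [← List.takeWhile_append_dropWhile (p := fun y => y.2 == x.2) (l := t)]
    rw [core_append_run _ x.2 _ hrun hrest, core_head_ne _ _ hrest, ih]
    simp

-- ===== VERDICT (by name: the statement is the Claim_ definition above) =====
theorem remove_duplicate_data_points_spec : Claim_equal_remove_duplicate_data_points := by
  intro l _
  unfold Spec_remove_duplicate_data_points remove_duplicate_data_points_alt
  rw [A_eq_core, altGo_eq_core]
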